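-- pv_equiv track=rewrite | github.com/sahilkhan-7/IPL-winning-team-prediction-model | IPL_Team_Management.py | remove_single_appearance_players
-- ===== SOURCE A (Python) =====
-- def remove_single_appearance_players(dataset):
--     player_counts = {}  # Dictionary to store player appearance counts
--
--     # Count player appearances
--     for entry in dataset:
--         player = entry['Player']
--         if player in player_counts:
--             player_counts[player] += 1
--         else:
--             player_counts[player] = 1
--
--     # Filter out players with only one appearance
--     filtered_dataset = [entry for entry in dataset if player_counts[entry['Player']] > 1]
--     return filtered_dataset
-- ===== SOURCE B (Python) =====
-- def remove_single_appearance_players(dataset):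
--     names = sorted(entry['Player'] for entry in dataset)
--     dups = {a for a, b in zip(names, names[1:]) if a == b}
--     return [entry for entry in dataset if entry['Player'] in dups]
-- ===== Notes on version B (the rewrite author's own statement) =====
-- stated objective: alternative
-- what changed: Replaces the hash frequency dict with sort-then-scan: sort the player names, collect names with an equal adjacent neighbour as the duplicate set, and filter the original dataset by membership in that set.
import Mathlib
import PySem

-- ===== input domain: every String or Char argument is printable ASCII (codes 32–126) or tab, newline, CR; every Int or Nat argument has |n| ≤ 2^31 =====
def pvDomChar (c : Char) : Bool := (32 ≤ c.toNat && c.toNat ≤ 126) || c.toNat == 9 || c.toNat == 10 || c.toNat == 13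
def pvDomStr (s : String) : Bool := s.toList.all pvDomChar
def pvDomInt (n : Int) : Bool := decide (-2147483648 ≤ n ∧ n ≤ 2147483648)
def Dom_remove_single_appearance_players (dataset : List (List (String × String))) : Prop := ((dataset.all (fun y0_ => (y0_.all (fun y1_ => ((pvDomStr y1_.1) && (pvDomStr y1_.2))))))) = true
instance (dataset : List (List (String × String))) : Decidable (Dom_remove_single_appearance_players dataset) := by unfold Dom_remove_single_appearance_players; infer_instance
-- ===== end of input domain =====

-- B replaces A's counting dict by sorting the names and collecting names with an equal
-- adjacent neighbour as the duplicate set; same result, a genuinely different strategy.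

-- ===== PORT A =====
-- entry['Player'] (first match; Pre_ guarantees the key is present, where Python would raise KeyError)
def pvPlayerA (e : List (String × String)) : String := ((PySem.Dict.mk e).get? "Player").getD ""

def remove_single_appearance_players (dataset : List (List (String × String))) : List (List (String × String)) :=
  let player_counts : PySem.Dict String Int :=
    dataset.foldl (fun d e =>
      let p := pvPlayerA e
      if d.contains p then d.insert p (d.getD p 0 + 1) else d.insert p 1) PySem.Dict.empty
  dataset.filter (fun e => decide (1 < player_counts.getD (pvPlayerA e) 0))

-- ===== PORT B =====
-- {a for a, b in zip(names, names[1:]) if a == b}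
def pvDupScan (names : List String) : PySem.Set String :=
  PySem.Set.ofList (((names.zip names.tail).filter (fun q => q.1 == q.2)).map (·.1))

def remove_single_appearance_players_alt (dataset : List (List (String × String))) : List (List (String × String)) :=
  let names := PySem.List.sorted (dataset.map pvPlayerA) (fun x => x) false
  let dups := pvDupScan names
  dataset.filter (fun e => PySem.Set.contains dups (pvPlayerA e))

-- ===== PRECONDITION & SPEC =====
-- Pre_ excludes exactly the entries without a 'Player' key, on which the Python A raises KeyError.
def Pre_remove_single_appearance_players (dataset : List (List (String × String))) : Prop :=
  ∀ e ∈ dataset, (PySem.Dict.mk e).contains "Player" = true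
instance (dataset : List (List (String × String))) : Decidable (Pre_remove_single_appearance_players dataset) := by unfold Pre_remove_single_appearance_players; infer_instance
def pvWitness_remove_single_appearance_players : (List (List (String × String))) :=
  [[("Player", "MS Dhoni")], [("Player", "MS Dhoni")], [("Player", "V Kohli")]]

def Spec_remove_single_appearance_players (dataset : List (List (String × String))) (out : List (List (String × String))) : Prop := out = remove_single_appearance_players_alt dataset
instance (dataset : List (List (String × String))) (out : List (List (String × String))) : Decidable (Spec_remove_single_appearance_players dataset out) := by unfold Spec_remove_single_appearance_players; infer_instance

-- ===== CLAIM (what is proved, stated in full; the proofs are below) =====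
def Claim_equal_remove_single_appearance_players : Prop := ∀ (dataset : List (List (String × String))), Dom_remove_single_appearance_players dataset → Pre_remove_single_appearance_players dataset → Spec_remove_single_appearance_players dataset (remove_single_appearance_players dataset)

-- ===== LEMMAS AND PROOFS =====

-- on a sorted list, a name has an equal adjacent neighbour iff it occurs at least twice
lemma mem_dupScan_iff (l : List String) (hl : l.Pairwise (· ≤ ·)) (p : String) :
    p ∈ ((l.zip l.tail).filter (fun q => q.1 == q.2)).map (·.1) ↔ 1 < l.count p := by
  induction l with
  | nil => simp
  | cons a t ih =>
    cases t with
    | nil =>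
      simp only [List.tail_cons, List.zip_nil_right, List.filter_nil, List.map_nil,
        List.not_mem_nil, List.count_cons, List.count_nil, false_iff, not_lt]
      split <;> omega
    | cons b t' =>
      have hab : a ≤ b := (List.pairwise_cons.mp hl).1 b (by simp)
      have htl : (b :: t').Pairwise (· ≤ ·) := (List.pairwise_cons.mp hl).2
      have hbt : ∀ x ∈ t', b ≤ x := fun x hx => (List.pairwise_cons.mp htl).1 x hx
      have hsplit : p ∈ ((( a :: b :: t').zip (a :: b :: t').tail).filter
            (fun q => q.1 == q.2)).map (·.1) ↔
          ((a = b ∧ p = a) ∨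
            p ∈ (((b :: t').zip (b :: t').tail).filter (fun q => q.1 == q.2)).map (·.1)) := by
        simp only [List.tail_cons, List.zip_cons_cons, List.filter_cons]
        by_cases hab' : a = b
        · rw [if_pos (beq_iff_eq.mpr hab')]
          simp only [List.map_cons, List.mem_cons]
          constructor
          · rintro (h | h)
            · exact Or.inl ⟨hab', h⟩
            · exact Or.inr h
          · rintro (⟨_, h⟩ | h)
            · exact Or.inl h
            · exact Or.inr h
        · rw [if_neg (by simp [hab'])]
          constructor
          · exact Or.inr
          · rintro (⟨h, _⟩ | h)
            · exact absurd h hab'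
            · exact h
      rw [hsplit, ih htl]
      have hmem_iff : a ∈ b :: t' ↔ a = b := by
        constructor
        · intro h
          rcases List.mem_cons.mp h with h1 | h1
          · exact h1
          · exact le_antisymm hab (hbt a h1)
        · intro h; simp [h]
      by_cases hpa : p = a
      · have h1 : List.count p (a :: b :: t') = List.count p (b :: t') + 1 := by
          simp [List.count_cons, hpa]
        rw [hpa] at h1 ⊢
        rw [h1]
        constructor
        · rintro (⟨hb, _⟩ | hgt)
          · have : 0 < (b :: t').count a := List.count_pos_iff.mpr (hmem_iff.mpr hb)
            omega
          · omega
        · intro h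
          have hpos : 0 < (b :: t').count a := by omega
          exact Or.inl ⟨hmem_iff.mp (List.count_pos_iff.mp hpos), rfl⟩
      · have hne : a ≠ p := fun h => hpa h.symm
        have h1 : List.count p (a :: b :: t') = List.count p (b :: t') := by
          simp [List.count_cons, hne]
        rw [h1]
        constructor
        · rintro (⟨_, hpa'⟩ | hgt)
          · exact absurd hpa' hpa
          · exact hgt
        · intro h
          exact Or.inr h

-- A's branching counting step is the unbranched insert-increment step
lemma stepA_eq (d : PySem.Dict String Int) (e : List (String × String)) :
    (let p := pvPlayerA e;
     if d.contains p then d.insert p (d.getD p 0 + 1) else d.insert p 1) =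
    d.insert (pvPlayerA e) (d.getD (pvPlayerA e) 0 + 1) := by
  by_cases hc : d.contains (pvPlayerA e) = true
  · simp [hc]
  · have h0 : d.getD (pvPlayerA e) 0 = 0 :=
      by
        have hc' : d.contains (pvPlayerA e) = false := by simpa using hc
        simp [PySem.Dict.getD_of_not_contains, hc']
    simp [hc, h0]

-- A's count of a player equals the multiset count of the name list
lemma countsA_getD (dataset : List (List (String × String))) (p : String) :
    (dataset.foldl (fun d e =>
        let q := pvPlayerA e
        if d.contains q then d.insert q (d.getD q 0 + 1) else d.insert q 1)
      PySem.Dict.empty).getD p 0 = ((dataset.map pvPlayerA).count p : Int) := by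
  have hstep : (fun (d : PySem.Dict String Int) e =>
      let q := pvPlayerA e
      if d.contains q then d.insert q (d.getD q 0 + 1) else d.insert q 1) =
      (fun d e => d.insert (pvPlayerA e) (d.getD (pvPlayerA e) 0 + 1)) := by
    funext d e; exact stepA_eq d e
  rw [hstep, ← List.foldl_map (f := pvPlayerA) (g := fun (d : PySem.Dict String Int) x => d.insert x (d.getD x 0 + 1))]
  rw [PySem.Dict.getD_foldl_insert_add_one]
  simp [PySem.Dict.getD_empty]

-- ===== VERDICT (by name: the statement is the Claim_ definition above) =====
theorem remove_single_appearance_players_spec : Claim_equal_remove_single_appearance_players := by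
  intro dataset _ _
  unfold Spec_remove_single_appearance_players
  unfold remove_single_appearance_players remove_single_appearance_players_alt
  simp only []
  apply (List.filter_congr _).symm
  intro e _
  set names := PySem.List.sorted (dataset.map pvPlayerA) (fun x => x) false with hnames
  have hsorted : names.Pairwise (· ≤ ·) := PySem.List.sorted_pairwise (dataset.map pvPlayerA) (fun x => x)
  have hperm : names.Perm (dataset.map pvPlayerA) := PySem.List.sorted_perm _ _ _
  have hcount : names.count (pvPlayerA e) = (dataset.map pvPlayerA).count (pvPlayerA e) := by
    rw [hperm.count_eq]
  have hiff := mem_dupScan_iff names hsorted (pvPlayerA e)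
  rw [hcount] at hiff
  have hmem : PySem.Set.contains (pvDupScan names) (pvPlayerA e) =
      decide ((pvPlayerA e) ∈ ((names.zip names.tail).filter (fun q => q.1 == q.2)).map (·.1)) := by
    unfold pvDupScan
    simp [PySem.Set.contains, PySem.Set.mem_ofList]
  rw [hmem, countsA_getD dataset (pvPlayerA e)]
  simp only [decide_eq_decide]
  rw [hiff]
  omega
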